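-- pv_equiv track=rewrite | github.com/gramschmidtz/ltto_edmd | src/edmd/observables.py | flat_index_from_multi
-- ===== SOURCE A (Python) =====
-- from typing import Tuple, Sequence
--
-- def flat_index_from_multi(indices: Sequence[int], order: int, dimension: int) -> int:
--     """
--     다차원 인덱스 (i,j,...)를 1차원 인덱스 idx로 변환.
--
--     Input
--     -----
--         indices: 길이 dimension의 튜플/리스트 (i1,i2,...,id)
--         order: 최대 차수 n
--         dimension: 차원 수 d
--
--     Returns
--     -------
--         idx: 1차원 인덱스 [0, (order+1)^dimension - 1]
--     """
--     if len(indices) != dimension: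
--         raise ValueError(f"indices 길이는 {dimension}이어야 합니다. got {len(indices)}")
--     o1 = order + 1
--     idx = 0
--     for d in range(dimension):
--         if indices[d] < 0 or indices[d] > order:
--             raise ValueError(f"각 인덱스는 [0, {order}] 범위여야 합니다. got {indices[d]} at dim {d}")
--         idx = idx * o1 + indices[d]
--     return idx
-- ===== SOURCE B (Python) =====
-- def flat_index_from_multi(indices, order, dimension):
--     if len(indices) != dimension:
--         raise ValueError(f"indices 길이는 {dimension}이어야 합니다. got {len(indices)}")
--     for d in range(dimension):
--         if indices[d] < 0 or indices[d] > order: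
--             raise ValueError(f"각 인덱스는 [0, {order}] 범위여야 합니다. got {indices[d]} at dim {d}")
--     o1 = order + 1
--     idx = 0
--     place = 1
--     for v in reversed(indices):
--         idx += v * place
--         place *= o1
--     return idx
-- ===== Notes on version B (the rewrite author's own statement) =====
-- stated objective: alternative
-- what changed: Validates first, then traverses the indices back-to-front with a running place value (idx += v*place; place *= order+1) instead of A's forward Horner multiply-add accumulator over range(dimension).
import Mathlib
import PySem

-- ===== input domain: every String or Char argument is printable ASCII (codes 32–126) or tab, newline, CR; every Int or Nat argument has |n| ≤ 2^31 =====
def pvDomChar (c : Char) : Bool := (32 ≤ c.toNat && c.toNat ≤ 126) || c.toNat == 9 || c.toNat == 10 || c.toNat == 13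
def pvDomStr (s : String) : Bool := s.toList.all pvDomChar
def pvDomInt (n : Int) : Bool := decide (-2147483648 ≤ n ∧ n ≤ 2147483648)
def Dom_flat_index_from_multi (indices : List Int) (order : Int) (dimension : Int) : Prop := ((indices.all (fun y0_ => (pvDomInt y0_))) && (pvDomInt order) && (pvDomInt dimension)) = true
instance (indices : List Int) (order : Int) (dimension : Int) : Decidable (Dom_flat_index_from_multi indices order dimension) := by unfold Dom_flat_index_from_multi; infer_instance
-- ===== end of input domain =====

-- B validates first and then traverses the indices back-to-front with a running place value,
-- instead of A's forward Horner multiply-add accumulator; alternative decomposition, same cost.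

-- ===== PORT A =====
-- Horner loop over range(dimension): idx = idx * (order+1) + indices[d]
def flat_index_from_multi (indices : List Int) (order : Int) (dimension : Int) : Int :=
  (PySem.List.pyRange 0 dimension 1).foldl
    (fun idx d => idx * (order + 1) + PySem.List.pyGetD indices d 0) 0

-- ===== PORT B =====
-- reversed(indices) with state (idx, place): idx += v * place; place *= o1.
-- The raising validation pass is excluded by Pre_, so the port carries only the returning loop.
def flat_index_from_multi_alt (indices : List Int) (order : Int) (dimension : Int) : Int :=
  let o1 := order + 1
  (indices.reverse.foldl (fun s v => (s.1 + v * s.2, s.2 * o1)) ((0 : Int), (1 : Int))).1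

-- ===== PRECONDITION & SPEC =====
-- Pre_ = exactly the inputs where A returns (no ValueError): correct length and all entries in [0, order].
def Pre_flat_index_from_multi (indices : List Int) (order : Int) (dimension : Int) : Prop :=
  (indices.length : Int) = dimension ∧ ∀ x ∈ indices, 0 ≤ x ∧ x ≤ order
instance (indices : List Int) (order : Int) (dimension : Int) : Decidable (Pre_flat_index_from_multi indices order dimension) := by unfold Pre_flat_index_from_multi; infer_instance

def pvWitness_flat_index_from_multi : List Int × Int × Int := ([2, 0, 3], 3, 3)

def Spec_flat_index_from_multi (indices : List Int) (order : Int) (dimension : Int) (out : Int) : Prop := out = flat_index_from_multi_alt indices order dimension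
instance (indices : List Int) (order : Int) (dimension : Int) (out : Int) : Decidable (Spec_flat_index_from_multi indices order dimension out) := by unfold Spec_flat_index_from_multi; infer_instance

-- ===== CLAIM (what is proved, stated in full; the proofs are below) =====
def Claim_equal_flat_index_from_multi : Prop := ∀ (indices : List Int) (order : Int) (dimension : Int), Dom_flat_index_from_multi indices order dimension → Pre_flat_index_from_multi indices order dimension → Spec_flat_index_from_multi indices order dimension (flat_index_from_multi indices order dimension)

-- ===== LEMMAS AND PROOFS =====

-- Shifting the Horner accumulator: foldl from a = a * o1^len + foldl from 0.
lemma horner_shift (o1 : Int) :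
    ∀ (xs : List Int) (a : Int),
      xs.foldl (fun i v => i * o1 + v) a
        = a * o1 ^ xs.length + xs.foldl (fun i v => i * o1 + v) 0 := by
  intro xs
  induction xs with
  | nil => intro a; simp
  | cons x t ih =>
      intro a
      simp only [List.foldl_cons, List.length_cons]
      rw [ih (a * o1 + x), ih (0 * o1 + x), pow_succ]
      ring

-- B's reversed fold computes (Horner value of xs, o1^len).
lemma revfold_eq_horner (o1 : Int) :
    ∀ (xs : List Int),
      xs.reverse.foldl (fun s v => (s.1 + v * s.2, s.2 * o1)) ((0 : Int), (1 : Int))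
        = (xs.foldl (fun i v => i * o1 + v) 0, o1 ^ xs.length) := by
  intro xs
  induction xs with
  | nil => simp
  | cons x t ih =>
      simp only [List.reverse_cons, List.foldl_append, ih, List.foldl_cons,
        List.length_cons]
      rw [horner_shift o1 t (0 * o1 + x)]
      simp only [List.foldl_nil, Prod.mk.injEq, pow_succ, zero_mul, zero_add]
      exact ⟨add_comm _ _, trivial⟩

theorem flat_index_from_multi_spec : Claim_equal_flat_index_from_multi := by
  intro indices order dimension _ hpre
  obtain ⟨hlen, _⟩ := hpre
  unfold Spec_flat_index_from_multi flat_index_from_multi flat_index_from_multi_alt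
  rw [← hlen]
  have hA := PySem.List.foldl_pyRange_pyGetD (a := 0) (xs := indices)
    (f := fun (i v : Int) => i * (order + 1) + v) (d := 0) (init := (0 : Int)) le_rfl
  simp only [Int.toNat_zero, List.drop_zero, PySem.List.len] at hA
  rw [hA]
  simp only [revfold_eq_horner]
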